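-- pv_equiv track=rewrite | github.com/miliar/Code_Jam_Webscraper | Solutions_in_python/Problem_155/Opera_Problem.py | solve
-- ===== SOURCE A (Python) =====
-- def solve(s_max, s_dist):
--     numFriends = 0
--     standingAudience = 0
--     for i in range(s_max+1):
--         if standingAudience < i:
--             numFriends += 1
--             standingAudience += 1
--         standingAudience += int(s_dist[i])
--     return numFriends
-- ===== SOURCE B (Python) =====
-- def solve(s_max, s_dist):
--     # stage 1: deficit before each block: h[i] = i - (natural audience seated so far)
--     h = []
--     acc = 0
--     for i in range(s_max + 1):
--         h.append(i - acc)
--         acc += int(s_dist[i])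
--     # stage 2: length of the longest chain j1 < j2 < ... with h[j_t] >= t,
--     # found by repeatedly searching for the first position meeting the next threshold
--     t = 1
--     start = 0
--     while True:
--         j = next((j for j in range(start, len(h)) if h[j] >= t), None)
--         if j is None:
--             return t - 1
--         t, start = t + 1, j + 1
-- ===== Notes on version B (the rewrite author's own statement) =====
-- stated objective: alternative
-- what changed: B replaces A's greedy lock-step mutation of two counters by two stages: it first materialises the array of natural-audience deficits h[i] = i - prefix_sum, then computes the answer as the length of the longest chain j1<j2<... with h[j_t] >= t, found by repeated first-match threshold searches over shrinking suffixes.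
-- outside the precondition, e.g. on solve(3, [1, 0, 0]): A raises IndexError, B raises IndexError
import Mathlib
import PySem

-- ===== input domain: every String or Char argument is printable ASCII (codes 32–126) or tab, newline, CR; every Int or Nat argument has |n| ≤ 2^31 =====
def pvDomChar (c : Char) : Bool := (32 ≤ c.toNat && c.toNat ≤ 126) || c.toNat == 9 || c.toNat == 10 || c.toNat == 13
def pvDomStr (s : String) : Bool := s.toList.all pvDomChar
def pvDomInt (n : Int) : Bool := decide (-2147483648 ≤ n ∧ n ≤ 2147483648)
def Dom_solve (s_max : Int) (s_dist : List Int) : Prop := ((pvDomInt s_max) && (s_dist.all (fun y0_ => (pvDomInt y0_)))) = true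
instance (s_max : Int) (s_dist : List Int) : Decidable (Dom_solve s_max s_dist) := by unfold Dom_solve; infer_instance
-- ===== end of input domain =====

-- B replaces A's greedy two-counter pass by two stages: build the deficit array
-- h[i] = i - prefix_sum, then compute the longest chain j1<j2<... with h[j_t] ≥ t by
-- repeated first-match threshold searches; objective: alternative algorithm, same cost.

-- ===== PORT A =====
-- loop body of A: state = (numFriends, standingAudience)
def stepA (s_dist : List Int) (st : Int × Int) (i : Int) : Int × Int :=
  let st' := if st.2 < i then (st.1 + 1, st.2 + 1) else st
  -- s_dist[i]: Pre_solve keeps i in range, so the default of pyGetD is never used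
  (st'.1, st'.2 + PySem.List.pyGetD s_dist i 0)

def solve (s_max : Int) (s_dist : List Int) : Int :=
  ((PySem.List.pyRange 0 (s_max + 1) 1).foldl (stepA s_dist) (0, 0)).1

-- ===== PORT B =====
-- stage-1 loop body: state = (h list so far, acc = natural audience seated so far)
def deficitStep (s_dist : List Int) (st : List Int × Int) (i : Int) : List Int × Int :=
  (st.1 ++ [i - st.2], st.2 + PySem.List.pyGetD s_dist i 0)

-- python's inner for/enumerate: first element ≥ t; returns the suffix after it (rest[k+1:])
def findRest (h : List Int) (t : Int) : Option (List Int) :=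
  match h with
  | [] => none
  | v :: r => if t ≤ v then some r else findRest r t

theorem findRest_length {h : List Int} {t : Int} {r : List Int}
    (hf : findRest h t = some r) : r.length < h.length := by
  induction h with
  | nil => simp [findRest] at hf
  | cons v s ih =>
    simp only [findRest] at hf
    split_ifs at hf with hle
    · cases hf; simp
    · exact Nat.lt_trans (ih hf) (by simp)

-- python's while loop: state = (rest, t)
def chain (h : List Int) (t : Int) : Int :=
  match hf : findRest h t with
  | none => t - 1
  | some r => chain r (t + 1)
termination_by h.length
decreasing_by exact findRest_length hf

def solve_alt (s_max : Int) (s_dist : List Int) : Int :=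
  let h := ((PySem.List.pyRange 0 (s_max + 1) 1).foldl (deficitStep s_dist) ([], 0)).1
  chain h 1

-- ===== PRECONDITION & SPEC =====
-- A raises IndexError when s_max ≥ len(s_dist) (it reads s_dist[s_max]); exactly those inputs are excluded.
def Pre_solve (s_max : Int) (s_dist : List Int) : Prop := s_max < (s_dist.length : Int)
instance (s_max : Int) (s_dist : List Int) : Decidable (Pre_solve s_max s_dist) := by
  unfold Pre_solve; infer_instance

def pvWitness_solve : Int × List Int := (2, [1, 0, 0])

def Spec_solve (s_max : Int) (s_dist : List Int) (out : Int) : Prop := out = solve_alt s_max s_dist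
instance (s_max : Int) (s_dist : List Int) (out : Int) : Decidable (Spec_solve s_max s_dist out) := by
  unfold Spec_solve; infer_instance

-- ===== CLAIM (what is proved, stated in full; the proofs are below) =====
def Claim_equal_solve : Prop := ∀ (s_max : Int) (s_dist : List Int),
  Dom_solve s_max s_dist → Pre_solve s_max s_dist → Spec_solve s_max s_dist (solve s_max s_dist)

-- ===== LEMMAS AND PROOFS =====

-- scan characterisations used to connect the two ports
def bumpGe (t v : Int) : Int := if t ≤ v then t + 1 else t
def bumpLt (c v : Int) : Int := if c < v then c + 1 else c

-- if no element reaches the threshold, the fold never bumps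
theorem findRest_none_fold {h : List Int} {t : Int} (hf : findRest h t = none) :
    h.foldl bumpGe t = t := by
  induction h with
  | nil => simp
  | cons v r ih =>
    simp only [findRest] at hf
    split_ifs at hf with hle
    rw [List.foldl_cons, bumpGe, if_neg hle, ih hf]

-- stepping past the first match advances the fold to threshold t+1
theorem findRest_some_fold {h : List Int} {t : Int} {r : List Int}
    (hf : findRest h t = some r) :
    h.foldl bumpGe t = r.foldl bumpGe (t + 1) := by
  induction h generalizing r with
  | nil => simp [findRest] at hf
  | cons v s ih =>
    simp only [findRest] at hf
    split_ifs at hf with hle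
    · cases hf; rw [List.foldl_cons, bumpGe, if_pos hle]
    · rw [List.foldl_cons, bumpGe, if_neg hle, ih hf]

-- chain = fold of bumpGe, minus 1
theorem chain_eq_fold (h : List Int) (t : Int) :
    chain h t = h.foldl bumpGe t - 1 := by
  fun_induction chain h t with
  | case1 h t hf => rw [findRest_none_fold hf]
  | case2 h t r hf ih => rw [ih, findRest_some_fold hf]

-- bumpGe at t+... equals bumpLt shifted by one
theorem fold_shift (h : List Int) (c : Int) :
    h.foldl bumpGe (c + 1) = h.foldl bumpLt c + 1 := by
  induction h generalizing c with
  | nil => simp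
  | cons v r ih =>
    simp only [List.foldl_cons, bumpGe, bumpLt]
    by_cases hlt : c < v
    · rw [if_pos (by omega : c + 1 ≤ v), if_pos hlt, ih]
    · rw [if_neg (by omega : ¬ c + 1 ≤ v), if_neg hlt, ih]

-- one combined step preserves the invariant
theorem step_pair (s_dist : List Int) (i f S P : Int) (hl : List Int)
    (h1 : P = S - f) (h2 : hl.foldl bumpLt 0 = f) :
    (deficitStep s_dist (hl, P) i).2 = (stepA s_dist (f, S) i).2 - (stepA s_dist (f, S) i).1
  ∧ (deficitStep s_dist (hl, P) i).1.foldl bumpLt 0 = (stepA s_dist (f, S) i).1 := by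
  simp only [deficitStep, stepA, List.foldl_append, List.foldl_cons, List.foldl_nil, h2, bumpLt]
  constructor
  · split_ifs with hc <;> omega
  · split_ifs with hc hd hd <;> omega

-- Invariant: after k steps, B's stage-1 state is (h_k, natural prefix) with
-- A's standing = natural prefix + friends, and friends = bumpLt-fold of h_k from 0.
theorem key (s_dist : List Int) (k : Nat) (hk : k ≤ s_dist.length) :
    (((PySem.List.pyRange 0 (k : Int) 1).foldl (deficitStep s_dist) ([], 0))).2
      = (((PySem.List.pyRange 0 (k : Int) 1).foldl (stepA s_dist) (0, 0))).2
        - (((PySem.List.pyRange 0 (k : Int) 1).foldl (stepA s_dist) (0, 0))).1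
  ∧ (((PySem.List.pyRange 0 (k : Int) 1).foldl (deficitStep s_dist) ([], 0))).1.foldl bumpLt 0
      = (((PySem.List.pyRange 0 (k : Int) 1).foldl (stepA s_dist) (0, 0))).1 := by
  induction k with
  | zero => simp [PySem.List.pyRange_one_eq_nil]
  | succ k ih =>
    have hk' : k ≤ s_dist.length := Nat.le_of_succ_le hk
    obtain ⟨ih1, ih2⟩ := ih hk'
    have hcast : ((k + 1 : Nat) : Int) = (k : Int) + 1 := by push_cast; ring
    rw [hcast, PySem.List.pyRange_one_succ_right (by positivity)]
    simp only [List.foldl_append, List.foldl_cons, List.foldl_nil]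
    set pA := (PySem.List.pyRange 0 (k : Int) 1).foldl (stepA s_dist) (0, 0) with hpA
    set pB := (PySem.List.pyRange 0 (k : Int) 1).foldl (deficitStep s_dist) ([], 0) with hpB
    exact step_pair s_dist (k : Int) pA.1 pA.2 pB.2 pB.1 (by omega) ih2

-- ===== VERDICT (by name: the statement is the Claim_ definition above) =====
theorem solve_spec : Claim_equal_solve := by
  intro s_max s_dist _dom hpre
  unfold Spec_solve solve solve_alt
  by_cases h : s_max + 1 ≤ 0
  · rw [PySem.List.pyRange_one_eq_nil (by omega)]
    simp [chain, findRest]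
  · have hpos : 0 ≤ s_max + 1 := by omega
    have hk : (s_max + 1).toNat ≤ s_dist.length := by
      unfold Pre_solve at hpre; omega
    have hcast : ((s_max + 1).toNat : Int) = s_max + 1 := Int.toNat_of_nonneg hpos
    obtain ⟨-, h2⟩ := key s_dist (s_max + 1).toNat hk
    rw [hcast] at h2
    have hs := fold_shift
      (((PySem.List.pyRange 0 (s_max + 1) 1).foldl (deficitStep s_dist) ([], 0))).1 0
    rw [chain_eq_fold]
    simp only [zero_add] at hs
    omega
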